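-- pv_equiv track=rewrite | github.com/Fatur-Maulidan/Disk-Scheduling | metode.py | LIFO
-- ===== SOURCE A (Python) =====
-- def LIFO(track, head, jumlah_track):
--     track_result_lifo = []
--     traversed_track_result = []
--
--     for i in range(jumlah_track - 1, -1, -1):
--         track_result_lifo.append(track[i])
--         if i == jumlah_track - 1:
--             traversed_track_result.append(abs(head - track[i]))
--         else:
--             traversed_track_result.append(abs(track[i] - track[i+1]))
--
--     return [head] + track_result_lifo, traversed_track_result
-- ===== SOURCE B (Python) =====
-- def LIFO(track, head, jumlah_track):
--     # Push the scheduled requests onto a stack, then serve by popping (true LIFO),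
--     # tracking the current head position instead of comparing indices.
--     stack = [track[i] for i in range(jumlah_track)]
--     path = [head]
--     dist = []
--     cur = head
--     while stack:
--         nxt = stack.pop()
--         dist.append(abs(cur - nxt))
--         path.append(nxt)
--         cur = nxt
--     return path, dist
-- ===== Notes on version B (the rewrite author's own statement) =====
-- stated objective: alternative
-- what changed: Replaces A's descending index loop with its first-iteration special case by an explicit stack: the first jumlah_track requests are pushed, then served by popping while a current-position accumulator yields each seek distance uniformly, with no index arithmetic or branch.
-- outside the precondition, e.g. on LIFO([1, 2], 5, 4): A raises IndexError, B raises IndexError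
import Mathlib
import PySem

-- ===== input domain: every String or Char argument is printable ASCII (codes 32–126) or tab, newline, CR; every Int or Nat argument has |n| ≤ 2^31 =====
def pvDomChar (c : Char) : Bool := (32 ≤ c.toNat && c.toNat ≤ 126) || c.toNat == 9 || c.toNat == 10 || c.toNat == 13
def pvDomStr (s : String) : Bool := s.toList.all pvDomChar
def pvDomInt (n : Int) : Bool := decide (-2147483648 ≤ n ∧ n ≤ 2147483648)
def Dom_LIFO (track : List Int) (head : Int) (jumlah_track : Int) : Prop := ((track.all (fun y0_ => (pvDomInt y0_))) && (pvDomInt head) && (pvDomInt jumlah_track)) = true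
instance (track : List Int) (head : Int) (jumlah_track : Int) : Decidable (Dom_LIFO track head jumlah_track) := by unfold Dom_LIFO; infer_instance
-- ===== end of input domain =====

-- B serves the requests as an explicit stack (push the first jumlah_track requests, then pop
-- while tracking the current head position), replacing A's descending index loop and its
-- first-iteration branch; same O(n) cost, different decomposition.

-- ===== PORT A =====
def LIFO (track : List Int) (head : Int) (jumlah_track : Int) : List Int × List Int :=
  let st := (PySem.List.pyRange (jumlah_track - 1) (-1) (-1)).foldl
    (fun (s : List Int × List Int) i =>
      (s.1 ++ [PySem.List.pyGetD track i 0],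
       s.2 ++ [if i = jumlah_track - 1
               then |head - PySem.List.pyGetD track i 0|
               else |PySem.List.pyGetD track i 0 - PySem.List.pyGetD track (i + 1) 0|]))
    ([], [])
  (head :: st.1, st.2)

-- ===== PORT B =====
-- Source B's `while stack: nxt = stack.pop()` — pop removes the LAST element, so the loop
-- recurses on `stack.dropLast` after reading `stack.getLastD 0` (stack is nonempty there).
def pvPopLoop (stack : List Int) (cur : Int) (path dist : List Int) : List Int × List Int :=
  if h : stack = [] then (path, dist)
  else
    let nxt := stack.getLastD 0
    pvPopLoop stack.dropLast nxt (path ++ [nxt]) (dist ++ [|cur - nxt|])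
termination_by stack.length
decreasing_by
  have : stack.length ≠ 0 := fun hl => h (List.eq_nil_of_length_eq_zero hl)
  simp [List.length_dropLast]; omega

def LIFO_alt (track : List Int) (head : Int) (jumlah_track : Int) : List Int × List Int :=
  let stack := (PySem.List.pyRange 0 jumlah_track 1).map (fun i => PySem.List.pyGetD track i 0)
  pvPopLoop stack head [head] []

-- ===== PRECONDITION & SPEC =====
-- Pre_ excludes exactly the inputs where Python raises IndexError (jumlah_track > len(track)); both A and B raise there.
def Pre_LIFO (track : List Int) (head : Int) (jumlah_track : Int) : Prop :=
  jumlah_track ≤ (track.length : Int)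
instance (track : List Int) (head : Int) (jumlah_track : Int) : Decidable (Pre_LIFO track head jumlah_track) := by unfold Pre_LIFO; infer_instance

def pvWitness_LIFO : List Int × Int × Int := ([5, 3, 9], 10, 3)

def Spec_LIFO (track : List Int) (head : Int) (jumlah_track : Int) (out : List Int × List Int) : Prop := out = LIFO_alt track head jumlah_track
instance (track : List Int) (head : Int) (jumlah_track : Int) (out : List Int × List Int) : Decidable (Spec_LIFO track head jumlah_track out) := by unfold Spec_LIFO; infer_instance

-- ===== CLAIM (what is proved, stated in full; the proofs are below) =====
def Claim_equal_LIFO : Prop := ∀ (track : List Int) (head : Int) (jumlah_track : Int), Dom_LIFO track head jumlah_track → Pre_LIFO track head jumlah_track → Spec_LIFO track head jumlah_track (LIFO track head jumlah_track)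

-- ===== LEMMAS AND PROOFS =====

/-- The successive-differences chain used to characterise both traversal lists. -/
def pvChain : Int → List Int → List Int
  | _, [] => []
  | p, x :: xs => |p - x| :: pvChain x xs

/-- The pop loop consumes the stack back-to-front: on `l.reverse` it appends `l` to the path
and the chain of successive distances from `cur` along `l`. -/
theorem pvPopLoop_reverse (l : List Int) (cur : Int) (path dist : List Int) :
    pvPopLoop l.reverse cur path dist = (path ++ l, dist ++ pvChain cur l) := by
  induction l generalizing cur path dist with
  | nil => simp [pvPopLoop, pvChain]
  | cons x xs ih =>
      rw [pvPopLoop]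
      have hne : xs.reverse ++ [x] ≠ [] := by simp
      simp only [List.reverse_cons, hne, dite_false, List.getLastD_concat,
        List.dropLast_concat]
      rw [ih]
      simp [pvChain]

/-- A's fold appends independent elements; split it into two maps. -/
theorem pvFold_split (l : List Int) (g f : Int → Int) (a b : List Int) :
    (l.foldl (fun (s : List Int × List Int) i => (s.1 ++ [g i], s.2 ++ [f i])) (a, b))
      = (a ++ l.map g, b ++ l.map f) := by
  induction l generalizing a b with
  | nil => simp
  | cons x xs ih => simp [List.foldl_cons, ih]

theorem pvChain_step (m : Nat) (t : Int → Int) :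
    pvChain (t (m : Int)) (((List.range m).map (fun k : Nat => t (k : Int))).reverse)
      = ((List.range m).map (fun k : Nat => |t (k : Int) - t ((k : Int) + 1)|)).reverse := by
  induction m with
  | zero => simp [pvChain]
  | succ m ih =>
      rw [List.range_succ]
      simp only [List.map_append, List.map_cons, List.map_nil, List.reverse_append,
        List.reverse_cons, List.reverse_nil, List.nil_append, List.cons_append]
      rw [show (((m + 1 : Nat) : Int)) = (m : Int) + 1 by push_cast; ring]
      simp only [pvChain, ih, abs_sub_comm]

theorem pvChain_main (m : Nat) (h : Int) (t : Int → Int) :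
    pvChain h (((List.range (m + 1)).map (fun k : Nat => t (k : Int))).reverse)
      = ((List.range (m + 1)).map (fun k : Nat =>
          if (k : Int) = (m : Int) then |h - t (k : Int)|
          else |t (k : Int) - t ((k : Int) + 1)|)).reverse := by
  rw [List.range_succ]
  simp only [List.map_append, List.map_cons, List.map_nil, List.reverse_append,
    List.reverse_cons, List.reverse_nil, List.nil_append, List.cons_append, pvChain]
  rw [if_pos trivial]
  congr 1
  rw [pvChain_step m t]
  congr 1
  apply List.map_congr_left
  intro k hk
  have hklt : k < m := List.mem_range.mp hk
  have hne : ¬ ((k : Int) = (m : Int)) := by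
    intro heq
    have : k = m := by exact_mod_cast heq
    omega
  simp [hne]

theorem pvRange_desc (n : Int) :
    PySem.List.pyRange (n - 1) (-1) (-1) = (PySem.List.pyRange 0 n 1).reverse := by
  have := PySem.List.pyRange_neg_one_eq_reverse (n - 1) (-1)
  simpa using this

-- ===== VERDICT (by name: the statement is the Claim_ definition above) =====
theorem LIFO_spec : Claim_equal_LIFO := by
  intro track head n _ _
  show LIFO track head n = LIFO_alt track head n
  by_cases hn : n ≤ 0
  · have h1 := PySem.List.pyRange_neg_one_eq_nil (a := n - 1) (b := -1) (by omega)
    have h2 := PySem.List.pyRange_one_eq_nil (a := 0) (b := n) (by omega)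
    simp [LIFO, LIFO_alt, h1, h2, pvPopLoop]
  · obtain ⟨m, hm⟩ : ∃ m : Nat, n = (m : Int) + 1 := ⟨(n - 1).toNat, by omega⟩
    have hrange : PySem.List.pyRange 0 n 1
        = (List.range (m + 1)).map (fun k : Nat => (k : Int)) := by
      rw [PySem.List.pyRange_one]
      have hnt : n.toNat = m + 1 := by omega
      simp [hnt]
    simp only [LIFO, LIFO_alt]
    rw [pvRange_desc, pvFold_split]
    have hrev : ((PySem.List.pyRange 0 n 1).map (fun i => PySem.List.pyGetD track i 0))
        = (((PySem.List.pyRange 0 n 1).map (fun i => PySem.List.pyGetD track i 0)).reverse).reverse := by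
      simp
    rw [hrev, pvPopLoop_reverse]
    simp only [List.map_reverse, List.nil_append]
    refine Prod.ext rfl ?_
    simp only [hrange, List.map_map, Function.comp_def]
    rw [pvChain_main m head (fun i => PySem.List.pyGetD track i 0)]
    have hn1 : n - 1 = (m : Int) := by omega
    simp only [hn1]
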